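-- pv_equiv track=rewrite | github.com/zradov/juristiq | src/transform_cuad.py | find_chunk_limits
-- ===== SOURCE A (Python) =====
-- def find_chunk_limits(contract_text: str,
--                       chunk: str,
--                       offset: int,
--                       min_chunk_len: int=40) -> tuple[int, int]:
--     """
--     Find the approximate start and end positions of a chunk within the contract text.
--
--     Args:
--         contract_text (str): The full text of the contract.
--         chunk (str): The text chunk to locate within the contract.
--         offset (int): The position in the contract text to start searching from.
--         min_chunk_len (int): Minimum length of chunk to consider for searching.
--
--     Returns:
--         A tuple containing the start and end positions of the chunk within the contract text.
--         Returns (-1, -1) if the chunk is not found.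
--     """
--
--     if len(chunk) < min_chunk_len:
--         return -1, -1
--     start = contract_text.find(chunk, offset)
--     if start == -1:
--         half_chunk_len = len(chunk)//2
--         chunk1 = chunk[:half_chunk_len]
--         chunk2 = chunk[half_chunk_len:]
--         start1, _ = find_chunk_limits(contract_text, chunk1, offset)
--         if start1 != -1:
--             start = start1
--         else:
--             start2, _ = find_chunk_limits(contract_text, chunk2, offset)
--             if start2 != -1:
--                 start = start2 - len(chunk1)
--             else:
--                 return -1, -1
--     end = start + len(chunk)
--
--     return start, end
-- ===== SOURCE B (Python) =====
-- def find_chunk_limits(contract_text: str,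
--                       chunk: str,
--                       offset: int,
--                       min_chunk_len: int = 40) -> tuple[int, int]:
--     """Iterative re-implementation: the half-split search is run as an explicit
--     abstract machine (call/return states with a frame stack) instead of recursion."""
--     n = len(chunk)
--     if n < min_chunk_len:
--         return -1, -1
--     p = contract_text.find(chunk, offset)
--     if p != -1:
--         return p, p + n
--     frames = [(0, n, 0)]   # (i, L, stage): node whose child is in progress (stage 0 = left half, 1 = right half)
--     i, L = 0, n // 2       # current call: locate chunk[i:i+L] (sub-chunk threshold is 40)
--     v = None               # None => "call" mode; otherwise the value being returned upward
--     while True: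
--         if v is None:
--             if L < 40:
--                 v = -1
--             else:
--                 p = contract_text.find(chunk[i:i + L], offset)
--                 if p != -1:
--                     v = p
--                 else:
--                     frames.append((i, L, 0))
--                     L //= 2
--         else:
--             fi, fL, stage = frames.pop()
--             mid = fL // 2
--             if stage == 0:
--                 if v == -1:
--                     frames.append((fi, fL, 1))
--                     i, L, v = fi + mid, fL - mid, None
--                 elif not frames:
--                     return v, v + n
--             else:
--                 if v == -1:
--                     if not frames:
--                         return -1, -1
--                 else:
--                     v -= mid
--                     if not frames:
--                         return v, v + n
-- ===== Notes on version B (the rewrite author's own statement) =====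
-- stated objective: alternative
-- what changed: A's half-split recursion (with its default-40 threshold on recursive calls and per-level -1 checks on returned starts) is replaced by an iterative abstract machine: a single while loop over explicit call/return states with a frame stack, performing the same pre-order half-split search.
import Mathlib
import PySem

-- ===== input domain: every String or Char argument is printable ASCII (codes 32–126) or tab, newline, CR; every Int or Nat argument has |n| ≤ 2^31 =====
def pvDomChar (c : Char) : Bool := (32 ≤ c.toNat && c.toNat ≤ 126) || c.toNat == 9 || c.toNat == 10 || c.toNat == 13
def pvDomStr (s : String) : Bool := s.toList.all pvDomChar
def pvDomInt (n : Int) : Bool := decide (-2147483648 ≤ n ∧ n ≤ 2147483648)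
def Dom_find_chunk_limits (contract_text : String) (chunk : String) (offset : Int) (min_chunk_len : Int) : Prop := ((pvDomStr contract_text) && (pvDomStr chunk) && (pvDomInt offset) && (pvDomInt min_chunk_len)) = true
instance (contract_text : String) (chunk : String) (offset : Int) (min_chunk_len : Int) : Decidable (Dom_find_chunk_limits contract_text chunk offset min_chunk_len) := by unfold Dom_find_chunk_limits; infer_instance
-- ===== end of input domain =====

-- B replaces A's half-split recursion by an iterative abstract machine (explicit
-- call/return frame stack); same return value, objective: alternative decomposition.

-- ===== PORT A =====
-- A's recursive search, on the character lists of the two strings.  Python's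
-- `len(chunk)//2` is `//` on a non-negative int, which is exactly Nat division here.
-- The recursive calls pass min_chunk_len's DEFAULT 40, exactly as A's code does.
-- small named termination facts, cited by the ports' decreasing_by (kept tiny on purpose)
lemma fclA_dec_left (chunk : List Char) (min_chunk_len : Int) (h : ¬ (chunk.length : Int) < min_chunk_len) :
    ((List.take (chunk.length / 2) chunk).length + if ((List.take (chunk.length / 2) chunk).length : Int) < 40 then 0 else 1) <
      chunk.length + if (chunk.length : Int) < min_chunk_len then 0 else 1 := by
  simp only [List.length_take]; split_ifs <;> omega

lemma fclA_dec_right (chunk : List Char) (min_chunk_len : Int) (h : ¬ (chunk.length : Int) < min_chunk_len) :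
    ((List.drop (chunk.length / 2) chunk).length + if ((List.drop (chunk.length / 2) chunk).length : Int) < 40 then 0 else 1) <
      chunk.length + if (chunk.length : Int) < min_chunk_len then 0 else 1 := by
  simp only [List.length_drop]; split_ifs <;> omega

def fclA (ct chunk : List Char) (offset : Int) (min_chunk_len : Int) : Int × Int :=
  if (chunk.length : Int) < min_chunk_len then (-1, -1)
  else
    let start := PySem.Chars.findFrom ct chunk offset none
    if start = -1 then
      let half := chunk.length / 2
      let chunk1 := chunk.take half
      let chunk2 := chunk.drop half
      let start1 := (fclA ct chunk1 offset 40).1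
      if start1 ≠ -1 then (start1, start1 + (chunk.length : Int))
      else
        let start2 := (fclA ct chunk2 offset 40).1
        if start2 ≠ -1 then
          (start2 - (chunk1.length : Int), start2 - (chunk1.length : Int) + (chunk.length : Int))
        else (-1, -1)
    else (start, start + (chunk.length : Int))
termination_by chunk.length + (if (chunk.length : Int) < min_chunk_len then 0 else 1)
decreasing_by
  · exact fclA_dec_left chunk min_chunk_len (by assumption)
  · exact fclA_dec_right chunk min_chunk_len (by assumption)

def find_chunk_limits (contract_text : String) (chunk : String) (offset : Int) (min_chunk_len : Int) : Int × Int :=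
  fclA contract_text.toList chunk.toList offset min_chunk_len

-- ===== PORT B =====
-- B's machine state: `call i L` = locate chunk[i:i+L]; `ret v` = value returned upward.
inductive MState where
  | call : Nat → Nat → MState
  | ret : Int → MState
deriving DecidableEq, Repr

-- termination measure for the machine: an upper bound on the remaining work below a node of width L
def mWeight (L : Nat) : Nat := if L < 40 then 1 else 5 * L - 150

-- one frame = (i, L, stage): node (i, L) whose left (stage 0) or right (stage 1) child is in progress
def mFrameW (f : Nat × Nat × Nat) : Nat :=
  if f.2.2 = 0 then mWeight (f.2.1 - f.2.1 / 2) + 2 else 1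

lemma mWeight_pos (L : Nat) : 1 ≤ mWeight L := by
  unfold mWeight; split <;> omega

lemma mFrameW_pos (f : Nat × Nat × Nat) : 1 ≤ mFrameW f := by
  have := mWeight_pos (f.2.1 - f.2.1 / 2); unfold mFrameW; split <;> omega

lemma machine_dec_pop (s L : Nat) : 0 + s < mWeight L + s := by
  have := mWeight_pos L; omega

lemma machine_dec_push (i L : Nat) (fs : List (Nat × Nat × Nat)) (h : ¬ L < 40) :
    mWeight (L / 2) + (List.map mFrameW ((i, L, 0) :: fs)).sum < mWeight L + (List.map mFrameW fs).sum := by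
  simp only [List.map_cons, List.sum_cons, mFrameW, mWeight]
  split_ifs <;> omega

lemma machine_dec_right (fi fL : Nat) (fs : List (Nat × Nat × Nat)) :
    mWeight (fL - fL / 2) + (List.map mFrameW ((fi, fL, 1) :: fs)).sum <
      0 + (List.map mFrameW ((fi, fL, 0) :: fs)).sum := by
  simp [List.map_cons, List.sum_cons, mFrameW]; omega

lemma machine_dec_cont (f f2 : Nat × Nat × Nat) (fs2 : List (Nat × Nat × Nat)) :
    0 + (List.map mFrameW (f2 :: fs2)).sum < 0 + (List.map mFrameW (f :: f2 :: fs2)).sum := by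
  have := mFrameW_pos f; simp only [List.map_cons, List.sum_cons]; omega

-- the while-loop of Source B; `machine … (.ret v) []` is never reached from fclB's entry state
def machine (ct chunk : List Char) (offset : Int) (n : Nat) : MState → List (Nat × Nat × Nat) → Int × Int
  | .call i L, fs =>
    if L < 40 then machine ct chunk offset n (.ret (-1)) fs
    else
      let p := PySem.Chars.findFrom ct ((chunk.drop i).take L) offset none
      if p ≠ -1 then machine ct chunk offset n (.ret p) fs
      else machine ct chunk offset n (.call i (L / 2)) ((i, L, 0) :: fs)
  | .ret _, [] => (-1, -1)
  | .ret v, (fi, fL, stage) :: fs =>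
    let mid := fL / 2
    if stage = 0 then
      if v = -1 then machine ct chunk offset n (.call (fi + mid) (fL - mid)) ((fi, fL, 1) :: fs)
      else
        match fs with
        | [] => (v, v + (n : Int))
        | f2 :: fs2 => machine ct chunk offset n (.ret v) (f2 :: fs2)
    else
      if v = -1 then
        match fs with
        | [] => (-1, -1)
        | f2 :: fs2 => machine ct chunk offset n (.ret (-1)) (f2 :: fs2)
      else
        match fs with
        | [] => (v - (mid : Int), v - (mid : Int) + (n : Int))
        | f2 :: fs2 => machine ct chunk offset n (.ret (v - (mid : Int))) (f2 :: fs2)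
termination_by st fs => (match st with | .call _ L => mWeight L | .ret _ => 0) + (fs.map mFrameW).sum
decreasing_by
  · exact machine_dec_pop _ _
  · exact machine_dec_pop _ _
  · exact machine_dec_push _ _ _ (by assumption)
  · subst_vars; exact machine_dec_right _ _ _
  · subst_vars; exact machine_dec_cont _ _ _
  · exact machine_dec_cont _ _ _
  · exact machine_dec_cont _ _ _
def fclB (ct chunk : List Char) (offset : Int) (min_chunk_len : Int) : Int × Int :=
  if (chunk.length : Int) < min_chunk_len then (-1, -1)
  else
    let p := PySem.Chars.findFrom ct chunk offset none
    if p ≠ -1 then (p, p + (chunk.length : Int))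
    else machine ct chunk offset chunk.length (.call 0 (chunk.length / 2)) [(0, chunk.length, 0)]

def find_chunk_limits_alt (contract_text : String) (chunk : String) (offset : Int) (min_chunk_len : Int) : Int × Int :=
  fclB contract_text.toList chunk.toList offset min_chunk_len

-- ===== PRECONDITION & SPEC =====
def Spec_find_chunk_limits (contract_text : String) (chunk : String) (offset : Int) (min_chunk_len : Int) (out : Int × Int) : Prop := out = find_chunk_limits_alt contract_text chunk offset min_chunk_len
instance (contract_text : String) (chunk : String) (offset : Int) (min_chunk_len : Int) (out : Int × Int) : Decidable (Spec_find_chunk_limits contract_text chunk offset min_chunk_len out) := by unfold Spec_find_chunk_limits; infer_instance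

-- ===== CLAIM (what is proved, stated in full; the proofs are below) =====
def Claim_equal_find_chunk_limits : Prop := ∀ (contract_text : String) (chunk : String) (offset : Int) (min_chunk_len : Int), Dom_find_chunk_limits contract_text chunk offset min_chunk_len → Spec_find_chunk_limits contract_text chunk offset min_chunk_len (find_chunk_limits contract_text chunk offset min_chunk_len)

-- ===== LEMMAS AND PROOFS =====

-- one-step unfolding of the machine in `call` state
lemma machine_call_unfold (ct chunk : List Char) (offset : Int) (n : Nat) (i L : Nat) (fs : List (Nat × Nat × Nat)) :
    machine ct chunk offset n (.call i L) fs =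
      if L < 40 then machine ct chunk offset n (.ret (-1)) fs
      else
        let p := PySem.Chars.findFrom ct ((chunk.drop i).take L) offset none
        if p ≠ -1 then machine ct chunk offset n (.ret p) fs
        else machine ct chunk offset n (.call i (L / 2)) ((i, L, 0) :: fs) := by
  rw [machine.eq_def]

-- one-step unfolding of the machine in `ret` state with a pending frame
lemma machine_ret_unfold (ct chunk : List Char) (offset : Int) (n : Nat) (v : Int) (fi fL stage : Nat) (fs : List (Nat × Nat × Nat)) :
    machine ct chunk offset n (.ret v) ((fi, fL, stage) :: fs) =
      (let mid := fL / 2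
       if stage = 0 then
         if v = -1 then machine ct chunk offset n (.call (fi + mid) (fL - mid)) ((fi, fL, 1) :: fs)
         else
           match fs with
           | [] => (v, v + (n : Int))
           | f2 :: fs2 => machine ct chunk offset n (.ret v) (f2 :: fs2)
       else
         if v = -1 then
           match fs with
           | [] => (-1, -1)
           | f2 :: fs2 => machine ct chunk offset n (.ret (-1)) (f2 :: fs2)
         else
           match fs with
           | [] => (v - (mid : Int), v - (mid : Int) + (n : Int))
           | f2 :: fs2 => machine ct chunk offset n (.ret (v - (mid : Int))) (f2 :: fs2)) := by
  rw [machine.eq_def]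

-- Running a call on node (i, L) is the same as returning A's start value for the
-- slice chunk[i:i+L] (threshold 40, as in A's recursive calls) to the waiting frames.
lemma machine_call_eq (ct chunk : List Char) (offset : Int) (n : Nat) :
    ∀ L i (fs : List (Nat × Nat × Nat)), fs ≠ [] → i + L ≤ chunk.length →
      machine ct chunk offset n (.call i L) fs =
        machine ct chunk offset n (.ret (fclA ct ((chunk.drop i).take L) offset 40).1) fs := by
  intro L
  induction L using Nat.strong_induction_on with
  | _ L IH =>
    intro i fs hfs hiL
    have hsub : ((chunk.drop i).take L).length = L := by
      simp only [List.length_take, List.length_drop]; omega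
    rw [machine_call_unfold, fclA, hsub]
    by_cases h40 : L < 40
    · have hg : ((L : Nat) : Int) < 40 := by exact_mod_cast h40
      simp [h40, hg]
    · have hg : ¬ ((L : Nat) : Int) < 40 := by exact_mod_cast h40
      simp only [h40, hg, if_false]
      by_cases hp : PySem.Chars.findFrom ct ((chunk.drop i).take L) offset none = -1
      · -- the direct find fails: both sides descend into the two halves
        have hs12 : ((chunk.drop i).take L).take (L / 2) = (chunk.drop i).take (L / 2) := by
          rw [List.take_take]; congr 1; omega
        have hs22 : ((chunk.drop i).take L).drop (L / 2) = (chunk.drop (i + L / 2)).take (L - L / 2) := by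
          rw [List.drop_take, List.drop_drop]
        have hlen1 : ((chunk.drop i).take (L / 2)).length = L / 2 := by
          simp only [List.length_take, List.length_drop]; omega
        simp only [hp, hs12, hs22, hlen1, ne_eq, not_true_eq_false, if_false, reduceIte]
        rw [IH (L / 2) (by omega) i ((i, L, 0) :: fs) (by simp) (by omega)]
        rw [machine_ret_unfold]
        by_cases hs1 : (fclA ct ((chunk.drop i).take (L / 2)) offset 40).1 = -1
        · simp only [hs1, reduceIte]
          rw [IH (L - L / 2) (by omega) (i + L / 2) ((i, L, 1) :: fs) (by simp) (by omega)]
          rw [machine_ret_unfold]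
          by_cases hs2 : (fclA ct ((chunk.drop (i + L / 2)).take (L - L / 2)) offset 40).1 = -1
          · simp only [hs2, reduceIte]
            cases fs with
            | nil => exact absurd rfl hfs
            | cons f2 fs2 => rfl
          · simp only [hs2, reduceIte]
            cases fs with
            | nil => exact absurd rfl hfs
            | cons f2 fs2 => rfl
        · simp only [hs1, reduceIte]
          cases fs with
          | nil => exact absurd rfl hfs
          | cons f2 fs2 => rfl
      · simp only [hp, ne_eq, not_false_eq_true, if_true, reduceIte]

theorem fcl_eq (ct chunk : List Char) (offset : Int) (min_chunk_len : Int) :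
    fclA ct chunk offset min_chunk_len = fclB ct chunk offset min_chunk_len := by
  rw [fclA, fclB]
  by_cases hg : (chunk.length : Int) < min_chunk_len
  · simp [hg]
  · simp only [hg, if_false]
    by_cases hp : PySem.Chars.findFrom ct chunk offset none = -1
    · simp only [hp, ne_eq, not_true_eq_false, if_false, reduceIte]
      have h1 := machine_call_eq ct chunk offset chunk.length (chunk.length / 2) 0
        [(0, chunk.length, 0)] (by simp) (by omega)
      rw [List.drop_zero] at h1
      rw [h1, machine_ret_unfold]
      have hlen1 : (chunk.take (chunk.length / 2)).length = chunk.length / 2 := by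
        simp only [List.length_take]; omega
      by_cases hs1 : (fclA ct (chunk.take (chunk.length / 2)) offset 40).1 = -1
      · simp only [hs1, reduceIte]
        have h2 := machine_call_eq ct chunk offset chunk.length (chunk.length - chunk.length / 2)
          (0 + chunk.length / 2) [(0, chunk.length, 1)] (by simp) (by omega)
        have hdt : (chunk.drop (0 + chunk.length / 2)).take (chunk.length - chunk.length / 2)
            = chunk.drop (chunk.length / 2) := by
          rw [Nat.zero_add]
          apply List.take_of_length_le
          simp [List.length_drop]
        rw [hdt] at h2
        rw [h2, machine_ret_unfold]
        by_cases hs2 : (fclA ct (chunk.drop (chunk.length / 2)) offset 40).1 = -1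
        · simp [hs2]
        · simp [hs2, hlen1]
      · simp [hs1]
    · simp [hp]

-- ===== VERDICT (by name: the statement is the Claim_ definition above) =====
theorem find_chunk_limits_spec : Claim_equal_find_chunk_limits := by
  intro ct chunk offset min_chunk_len _
  unfold Spec_find_chunk_limits find_chunk_limits find_chunk_limits_alt
  exact fcl_eq _ _ _ _
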